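-- pv_equiv track=rewrite | github.com/choisaywhy/boj | review/카카오모빌리티/2.py | solution
-- ===== SOURCE A (Python) =====
-- def solution(id_list, k):
--     total = {}
--
--     for ids in id_list :
--         ids = set(ids.split())
--
--         for i in ids :
--             total[i] = total.get(i, 0) + 1
--             if total[i] > k :
--                 total[i] -= 1
--
--     answer = sum(total.values())
--
--     return answer
-- ===== SOURCE B (Python) =====
-- def solution(id_list, k):
--     occ = sorted(i for ids in id_list for i in set(ids.split()))
--     total = 0
--     i = 0
--     n = len(occ)
--     while i < n:
--         j = i
--         while j < n and occ[j] == occ[i]: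
--             j += 1
--         total += max(0, min(j - i, k))
--         i = j
--     return total
-- ===== Notes on version B (the rewrite author's own statement) =====
-- stated objective: alternative
-- what changed: B uses no dictionary at all: it sorts the flattened per-report id occurrences and makes one run-length scan over the sorted list, adding the clamped length of each run of equal ids, instead of A's hash-map counting with an inline increment-then-decrement cap.
import Mathlib
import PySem

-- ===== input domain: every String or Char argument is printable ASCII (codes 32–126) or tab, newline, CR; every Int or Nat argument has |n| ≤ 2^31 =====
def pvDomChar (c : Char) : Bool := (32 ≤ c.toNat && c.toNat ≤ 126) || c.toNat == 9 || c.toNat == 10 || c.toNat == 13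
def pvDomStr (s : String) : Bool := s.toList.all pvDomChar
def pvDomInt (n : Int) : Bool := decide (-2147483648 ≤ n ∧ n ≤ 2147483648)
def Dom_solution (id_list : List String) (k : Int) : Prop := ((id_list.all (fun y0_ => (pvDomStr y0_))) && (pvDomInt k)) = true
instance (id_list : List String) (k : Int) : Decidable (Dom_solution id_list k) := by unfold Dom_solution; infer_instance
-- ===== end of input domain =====

-- B replaces A's dictionary counting (with inline increment-then-decrement cap) by sorting the flattened occurrences and one run-length scan clamping each run (alternative algorithm; not claimed faster).

-- ===== PORT A =====
def solution (id_list : List String) (k : Int) : Int :=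
  let total : PySem.Dict String Int :=
    id_list.foldl (fun total ids =>
      let s := PySem.Set.ofList (PySem.Str.split₀ ids)
      s.foldl (fun total i =>
        let total := total.insert i (total.getD i 0 + 1)
        if total.getD i 0 > k then total.insert i (total.getD i 0 - 1) else total) total)
      PySem.Dict.empty
  total.values.sum

-- ===== PORT B =====
-- the outer while loop of Source B: each iteration consumes one maximal run of equal ids (inner while = takeWhile/dropWhile) and adds its clamped length
def runSum (k : Int) : List String → Int
  | [] => 0
  | x :: xs =>
      max 0 (min (((xs.takeWhile (fun y => y == x)).length : Int) + 1) k)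
        + runSum k (xs.dropWhile (fun y => y == x))
  termination_by l => l.length
  decreasing_by
    simp only [List.length_cons]
    exact Nat.lt_succ_of_le (List.length_dropWhile_le _ _)

def solution_alt (id_list : List String) (k : Int) : Int :=
  let occ := PySem.List.sorted (id_list.flatMap (fun ids => PySem.Set.ofList (PySem.Str.split₀ ids))) (fun x => x) false
  runSum k occ

-- ===== PRECONDITION & SPEC =====
def Spec_solution (id_list : List String) (k : Int) (out : Int) : Prop := out = solution_alt id_list k
instance (id_list : List String) (k : Int) (out : Int) : Decidable (Spec_solution id_list k out) := by unfold Spec_solution; infer_instance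

-- ===== CLAIM =====
def Claim_equal_solution : Prop := ∀ (id_list : List String) (k : Int), Dom_solution id_list k → Spec_solution id_list k (solution id_list k)

-- ===== LEMMAS AND PROOFS =====

-- A's per-occurrence body: insert the incremented count, then undo if it exceeded k = one insert of a capped value
theorem stepA_eq (k : Int) (d : PySem.Dict String Int) (i : String) :
    (let d' := d.insert i (d.getD i 0 + 1)
     if d'.getD i 0 > k then d'.insert i (d'.getD i 0 - 1) else d')
    = d.insert i (if d.getD i 0 + 1 > k then d.getD i 0 else d.getD i 0 + 1) := by
  simp only [PySem.Dict.getD_insert_self, PySem.Dict.insert_insert_self]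
  split_ifs <;> simp

-- A's dict after processing any occurrence list l holds, per key, the clamp of the key's count
theorem getD_A (k : Int) (l : List String) (key : String) :
    (l.foldl (fun d i => d.insert i (if d.getD i 0 + 1 > k then d.getD i 0 else d.getD i 0 + 1))
        PySem.Dict.empty).getD key 0
    = max 0 (min (l.count key : Int) k) := by
  induction l using List.reverseRecOn with
  | nil => simp [PySem.Dict.getD_empty]
  | append_singleton xs x ih =>
    rw [List.foldl_append]
    simp only [List.foldl_cons, List.foldl_nil, PySem.Dict.getD_insert]
    rw [List.count_append]
    by_cases h : key = x
    · subst h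
      simp only [ih]
      simp only [List.count_singleton, beq_self_eq_true, if_pos]
      push_cast
      omega
    · simp only [if_neg h, ih]
      have : x ≠ key := fun e => h e.symm
      simp [this]

theorem keys_A (k : Int) (l : List String) :
    (l.foldl (fun d i => d.insert i (if d.getD i 0 + 1 > k then d.getD i 0 else d.getD i 0 + 1))
        PySem.Dict.empty).keys = PySem.Set.ofList l := by
  rw [PySem.Dict.keys_foldl_insert, PySem.Dict.keys_empty, PySem.Set.update_nil_left]

-- sum of a map over a nodup list as a Finset sum
theorem sum_map_nodup (s : List String) (hs : s.Nodup) (f : String → Int) :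
    (s.map f).sum = ∑ d ∈ s.toFinset, f d := by
  induction s with
  | nil => simp
  | cons x xs ih =>
    simp only [List.map_cons, List.sum_cons, List.toFinset_cons]
    rw [Finset.sum_insert (by simpa using (List.nodup_cons.mp hs).1), ih (List.nodup_cons.mp hs).2]

-- the run-length scan over a sorted list computes the per-distinct-id clamped counts
theorem runSum_eq (k : Int) : ∀ (n : Nat) (l : List String), l.length ≤ n → l.Pairwise (· ≤ ·) →
    runSum k l = ∑ d ∈ l.toFinset, max 0 (min (l.count d : Int) k) := by
  intro n
  induction n with
  | zero =>
    intro l hl _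
    have : l = [] := List.eq_nil_of_length_eq_zero (Nat.le_zero.mp hl)
    subst this; simp [runSum]
  | succ n ih =>
    intro l hl hp
    match l with
    | [] => simp [runSum]
    | x :: xs =>
      set t := xs.takeWhile (fun y => y == x) with hts
      set r := xs.dropWhile (fun y => y == x) with hrs
      have hsplit : xs = t ++ r := (List.takeWhile_append_dropWhile).symm
      have ht : ∀ y ∈ t, y = x := by
        intro y hy
        have := List.mem_takeWhile_imp hy
        exact eq_of_beq this
      have hxxs : ∀ y ∈ xs, x ≤ y := (List.pairwise_cons.mp hp).1
      have hpxs : xs.Pairwise (· ≤ ·) := (List.pairwise_cons.mp hp).2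
      have hpr : r.Pairwise (· ≤ ·) := List.Pairwise.sublist (List.dropWhile_sublist _) hpxs
      have hxr : x ∉ r := by
        intro hxrmem
        obtain ⟨h, r', hr⟩ : ∃ h r', r = h :: r' := by
          cases hcc : r with
          | nil => rw [hcc] at hxrmem; simp at hxrmem
          | cons a b => exact ⟨a, b, rfl⟩
        rw [hr] at hxrmem hpr
        have hdw : xs.dropWhile (fun y => y == x) = h :: r' := by rw [← hrs, hr]
        have hhne : ¬ (h == x) = true := by
          have := List.head?_dropWhile_not (fun y => y == x) xs
          rw [hdw] at this
          simpa using this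
        have hhx : h ≠ x := fun e => hhne (by simp [e])
        have hsub : List.Sublist (h :: r') xs := hdw ▸ List.dropWhile_sublist _
        have hhxs : h ∈ xs := hsub.subset List.mem_cons_self
        have hxh : x ≤ h := hxxs h hhxs
        rcases List.mem_cons.mp hxrmem with h1 | h1
        · exact hhx h1.symm
        · have : h ≤ x := (List.pairwise_cons.mp hpr).1 x h1
          exact hhx (le_antisymm this hxh)
      have hcountt : ∀ d, d ≠ x → t.count d = 0 := by
        intro d hd
        exact List.count_eq_zero.mpr (fun hmem => hd (ht d hmem))
      have hcountxt : t.count x = t.length := by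
        rw [List.count_eq_length]
        intro y hy; simp [ht y hy]
      -- toFinset collapse: all of t equals x
      have hfin : (x :: xs).toFinset = insert x r.toFinset := by
        ext d
        simp only [List.toFinset_cons, Finset.mem_insert, List.mem_toFinset, hsplit,
          List.mem_append]
        constructor
        · rintro (h1 | h1 | h1)
          · exact Or.inl h1
          · exact Or.inl (ht d h1)
          · exact Or.inr h1
        · rintro (h1 | h1)
          · exact Or.inl h1
          · exact Or.inr (Or.inr h1)
      have hrlen : r.length ≤ n := by
        have : xs.length ≤ n := Nat.lt_succ_iff.mp (by simpa using hl)
        exact le_trans (List.length_dropWhile_le _ _) this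
      have hrec := ih r hrlen hpr
      rw [runSum, hrec, hfin, Finset.sum_insert (by simpa using hxr)]
      have hcx : ((x :: xs).count x : Int) = (t.length : Int) + 1 := by
        rw [List.count_cons_self, hsplit, List.count_append, hcountxt,
          List.count_eq_zero.mpr hxr]
        push_cast; ring
      rw [← hcx]
      congr 1
      apply Finset.sum_congr rfl
      intro d hd
      have hdr : d ∈ r := List.mem_toFinset.mp hd
      have hdx : d ≠ x := fun e => hxr (e ▸ hdr)
      have : (x :: xs).count d = r.count d := by
        rw [hsplit]
        have hxd : ¬ x = d := fun e => hdx e.symm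
        simp only [List.count_cons, List.count_append, hcountt d hdx]
        simp [hxd]
      rw [this]

-- ===== VERDICT =====
theorem solution_spec : Claim_equal_solution := by
  intro id_list k _
  unfold Spec_solution solution solution_alt
  simp only []
  have hbody : (fun (total : PySem.Dict String Int) (ids : String) =>
        (PySem.Set.ofList (PySem.Str.split₀ ids)).foldl (fun total i =>
          let total := total.insert i (total.getD i 0 + 1)
          if total.getD i 0 > k then total.insert i (total.getD i 0 - 1) else total) total)
      = (fun (total : PySem.Dict String Int) (ids : String) =>
        (PySem.Set.ofList (PySem.Str.split₀ ids)).foldl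
          (fun d i => d.insert i (if d.getD i 0 + 1 > k then d.getD i 0 else d.getD i 0 + 1)) total) := by
    funext total ids
    congr 1
    funext d i
    exact stepA_eq k d i
  rw [hbody, ← List.foldl_flatMap]
  set occ := id_list.flatMap (fun ids => PySem.Set.ofList (PySem.Str.split₀ ids)) with hocc
  set dA := occ.foldl (fun d i => d.insert i (if d.getD i 0 + 1 > k then d.getD i 0 else d.getD i 0 + 1)) PySem.Dict.empty with hdA
  have hkA : dA.keys = PySem.Set.ofList occ := keys_A k occ
  have hndA : dA.keys.Nodup := by rw [hkA]; exact PySem.Set.nodup_ofList occ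
  rw [PySem.Dict.values_eq_map_keys dA hndA 0, hkA]
  -- A's side as a Finset sum over the distinct occurrences
  have hA : ((PySem.Set.ofList occ).map (fun key => dA.getD key 0)).sum
      = ∑ d ∈ occ.toFinset, max 0 (min (occ.count d : Int) k) := by
    rw [sum_map_nodup _ (PySem.Set.nodup_ofList occ)]
    have hfe : (PySem.Set.ofList occ).toFinset = occ.toFinset := by
      ext d; simp [PySem.Set.mem_ofList]
    rw [hfe]
    exact Finset.sum_congr rfl (fun d _ => getD_A k occ d)
  rw [hA]
  -- B's side: run-length scan over the sorted occurrences
  set s := PySem.List.sorted occ (fun x => x) false with hs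
  have hperm : s.Perm occ := PySem.List.sorted_perm occ (fun x => x) false
  have hpair : s.Pairwise (· ≤ ·) := PySem.List.sorted_pairwise occ (fun x => x)
  rw [runSum_eq k s.length s le_rfl hpair]
  have hfs : s.toFinset = occ.toFinset := by
    ext d; simp [List.mem_toFinset, hperm.mem_iff]
  exact (Finset.sum_congr hfs (fun d _ => by rw [hperm.count_eq])).symm
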